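-- pv_equiv track=rewrite | github.com/tblacerda/skynet | SkynetRev1_5.py | is_2600_20MHz
-- ===== SOURCE A (Python) =====
-- def is_2600_20MHz(cell_name):
--     """Check if the cell name ends with any of the specified strings."""
--     special_endings = ["26-1A",
--                        "26-1B",
--                        "26-1C",
--                        "26-2A",
--                        "26-2B",
--                        "26-2C",
--                        "26-3A",
--                        "26-3B",
--                        "26-3C",
--                        "26-4A",
--                        "26-4B",
--                        "26-4C",
--                        "26-1D",
--                        "26-2D",
--                        "26-3D",
--                        "26-4D"]
--     return any(cell_name.endswith(ending) for ending in special_endings)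
-- ===== SOURCE B (Python) =====
-- def is_2600_20MHz(cell_name):
--     """Check if the cell name ends with any of the specified strings."""
--     return (len(cell_name) >= 5
--             and cell_name[-5] == "2"
--             and cell_name[-4] == "6"
--             and cell_name[-3] == "-"
--             and cell_name[-2] in "1234"
--             and cell_name[-1] in "ABCD")
-- ===== Notes on version B (the rewrite author's own statement) =====
-- stated objective: simpler
-- what changed: B replaces the scan over an explicit 16-element suffix list with one positional parse of the last five characters (length >= 5, '2','6','-' at -5..-3, digit 1-4 at -2, letter A-D at -1).
import Mathlib
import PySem

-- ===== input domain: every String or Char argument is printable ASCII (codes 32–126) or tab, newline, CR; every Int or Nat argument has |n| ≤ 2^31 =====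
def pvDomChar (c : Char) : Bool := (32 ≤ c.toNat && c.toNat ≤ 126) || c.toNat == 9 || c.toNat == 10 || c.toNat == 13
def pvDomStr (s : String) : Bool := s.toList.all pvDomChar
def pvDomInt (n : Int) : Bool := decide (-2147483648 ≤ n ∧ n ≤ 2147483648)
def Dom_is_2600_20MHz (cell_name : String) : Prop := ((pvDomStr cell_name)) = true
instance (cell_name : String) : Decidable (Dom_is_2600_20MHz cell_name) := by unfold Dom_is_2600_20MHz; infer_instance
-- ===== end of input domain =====

-- B replaces the 16-suffix endswith scan by one positional parse of the last five
-- characters (simpler: no list of suffixes, no scan).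

-- ===== PORT A =====
def is_2600_20MHz (cell_name : String) : Bool :=
  let special_endings : List String :=
    ["26-1A", "26-1B", "26-1C",
     "26-2A", "26-2B", "26-2C",
     "26-3A", "26-3B", "26-3C",
     "26-4A", "26-4B", "26-4C",
     "26-1D", "26-2D", "26-3D", "26-4D"]
  special_endings.any (fun ending => PySem.Str.endswith cell_name ending)

-- ===== PORT B =====
def is_2600_20MHz_alt (cell_name : String) : Bool :=
  decide (5 ≤ PySem.Str.len cell_name) &&
  (PySem.Str.pyGet? cell_name (-5) == some '2') &&
  (PySem.Str.pyGet? cell_name (-4) == some '6') &&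
  (PySem.Str.pyGet? cell_name (-3) == some '-') &&
  (match PySem.Str.pyGet? cell_name (-2) with
   | some c => PySem.Str.isIn (String.ofList [c]) "1234"
   | none => false) &&
  (match PySem.Str.pyGet? cell_name (-1) with
   | some c => PySem.Str.isIn (String.ofList [c]) "ABCD"
   | none => false)

-- ===== PRECONDITION & SPEC =====
def Spec_is_2600_20MHz (cell_name : String) (out : Bool) : Prop := out = is_2600_20MHz_alt cell_name
instance (cell_name : String) (out : Bool) : Decidable (Spec_is_2600_20MHz cell_name out) := by unfold Spec_is_2600_20MHz; infer_instance

-- ===== CLAIM (what is proved, stated in full; the proofs are below) =====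
def Claim_equal_is_2600_20MHz : Prop := ∀ (cell_name : String), Dom_is_2600_20MHz cell_name → Spec_is_2600_20MHz cell_name (is_2600_20MHz cell_name)

-- ===== LEMMAS AND PROOFS =====

-- a one-character string is a substring iff the character occurs
theorem isIn_singleton (c : Char) (cs : List Char) :
    PySem.Chars.isIn [c] cs = cs.contains c := by
  by_cases h : c ∈ cs
  · obtain ⟨s, t, rfl⟩ := List.append_of_mem h
    rw [(PySem.Chars.isIn_iff_infix _ _).mpr ⟨s, t, by simp⟩]
    simp [h]
  · have : ¬ ([c] <:+: cs) := fun hin => h (hin.mem (by simp))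
    rw [(PySem.Chars.isIn_eq_false_iff _ _).mpr this]
    simp [h]

-- negative indexing read off the reversed list
theorem pyGet_neg_rev (l : List Char) (k : Nat) (hk : 0 < k) (h : k ≤ l.length) :
    PySem.List.pyGet? l (-(k : Int)) = l.reverse[k - 1]? := by
  rw [PySem.List.pyGet?_neg_natCast l k hk h, List.getElem?_reverse (by omega)]
  congr 1
  omega

-- a length-5 suffix read off the reversed list
theorem suffix5 (l : List Char) (e d c b a : Char) (t : List Char) (hr : l.reverse = e::d::c::b::a::t)
    (p1 p2 p3 p4 p5 : Char) :
    ([p1,p2,p3,p4,p5] <:+ l) ↔ (a = p1 ∧ b = p2 ∧ c = p3 ∧ d = p4 ∧ e = p5) := by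
  rw [← List.reverse_prefix, hr]
  simp [List.cons_prefix_cons]
  tauto

-- ===== VERDICT (by name: the statement is the Claim_ definition above) =====
set_option maxHeartbeats 1600000 in
theorem is_2600_20MHz_spec : Claim_equal_is_2600_20MHz := by
  intro s hdom
  clear hdom
  unfold Spec_is_2600_20MHz is_2600_20MHz is_2600_20MHz_alt
  rw [Bool.eq_iff_iff]
  simp only [List.any_cons, List.any_nil, Bool.or_eq_true, Bool.or_false,
    PySem.Str.endswith_eq, PySem.Chars.endswith_iff,
    PySem.Str.len_eq, PySem.Str.pyGet?_eq, PySem.Chars.pyGet?_eq_listPyGet?]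
  rw [show ("26-1A".toList) = ['2','6','-','1','A'] from rfl]
  rw [show ("26-1B".toList) = ['2','6','-','1','B'] from rfl]
  rw [show ("26-1C".toList) = ['2','6','-','1','C'] from rfl]
  rw [show ("26-2A".toList) = ['2','6','-','2','A'] from rfl]
  rw [show ("26-2B".toList) = ['2','6','-','2','B'] from rfl]
  rw [show ("26-2C".toList) = ['2','6','-','2','C'] from rfl]
  rw [show ("26-3A".toList) = ['2','6','-','3','A'] from rfl]
  rw [show ("26-3B".toList) = ['2','6','-','3','B'] from rfl]
  rw [show ("26-3C".toList) = ['2','6','-','3','C'] from rfl]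
  rw [show ("26-4A".toList) = ['2','6','-','4','A'] from rfl]
  rw [show ("26-4B".toList) = ['2','6','-','4','B'] from rfl]
  rw [show ("26-4C".toList) = ['2','6','-','4','C'] from rfl]
  rw [show ("26-1D".toList) = ['2','6','-','1','D'] from rfl]
  rw [show ("26-2D".toList) = ['2','6','-','2','D'] from rfl]
  rw [show ("26-3D".toList) = ['2','6','-','3','D'] from rfl]
  rw [show ("26-4D".toList) = ['2','6','-','4','D'] from rfl]
  have hlen := List.length_reverse (as := s.toList)
  rcases hr : s.toList.reverse with _ | ⟨e, _ | ⟨d, _ | ⟨c, _ | ⟨b, _ | ⟨a, t⟩⟩⟩⟩⟩ <;>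
    rw [hr] at hlen <;>
    simp only [List.length_nil, List.length_cons] at hlen
  -- short strings: every 5-character suffix test fails and the length guard fails
  case nil | cons.nil | cons.cons.nil | cons.cons.cons.nil | cons.cons.cons.cons.nil =>
    constructor
    · rintro (h | h | h | h | h | h | h | h | h | h | h | h | h | h | h | h) <;>
        · have := h.length_le
          simp only [List.length_cons, List.length_nil] at this
          omega
    · intro h
      simp only [Bool.and_eq_true, decide_eq_true_eq] at h
      omega
  -- long strings: read the last five characters positionally
  case cons.cons.cons.cons.cons =>
  have hL : 5 ≤ s.toList.length := by omega
  have g5 : PySem.List.pyGet? s.toList (-5) = some a := by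
    rw [show (-5 : Int) = -((5 : Nat) : Int) from by norm_num,
      pyGet_neg_rev _ 5 (by norm_num) hL, hr]; rfl
  have g4 : PySem.List.pyGet? s.toList (-4) = some b := by
    rw [show (-4 : Int) = -((4 : Nat) : Int) from by norm_num,
      pyGet_neg_rev _ 4 (by norm_num) (by omega), hr]; rfl
  have g3 : PySem.List.pyGet? s.toList (-3) = some c := by
    rw [show (-3 : Int) = -((3 : Nat) : Int) from by norm_num,
      pyGet_neg_rev _ 3 (by norm_num) (by omega), hr]; rfl
  have g2 : PySem.List.pyGet? s.toList (-2) = some d := by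
    rw [show (-2 : Int) = -((2 : Nat) : Int) from by norm_num,
      pyGet_neg_rev _ 2 (by norm_num) (by omega), hr]; rfl
  have g1 : PySem.List.pyGet? s.toList (-1) = some e := by
    rw [show (-1 : Int) = -((1 : Nat) : Int) from by norm_num,
      pyGet_neg_rev _ 1 (by norm_num) (by omega), hr]; rfl
  rw [g5, g4, g3, g2, g1]
  simp only [PySem.Str.isIn_eq, String.toList_ofList,
    show ("1234".toList) = ['1','2','3','4'] from rfl,
    show ("ABCD".toList) = ['A','B','C','D'] from rfl,
    isIn_singleton, List.contains_cons, List.contains_nil, Bool.or_false,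
    Bool.and_eq_true, Bool.or_eq_true, beq_iff_eq, decide_eq_true_eq, Option.some.injEq,
    suffix5 s.toList e d c b a t hr]
  clear hr g1 g2 g3 g4 g5 hlen
  have hLi : (5 : Int) ≤ (s.toList.length : Int) := by exact_mod_cast hL
  clear hL
  generalize (s.toList.length : Int) = L at hLi
  constructor
  · rintro (⟨rfl, rfl, rfl, rfl, rfl⟩ | ⟨rfl, rfl, rfl, rfl, rfl⟩ | ⟨rfl, rfl, rfl, rfl, rfl⟩ | ⟨rfl, rfl, rfl, rfl, rfl⟩ | ⟨rfl, rfl, rfl, rfl, rfl⟩ | ⟨rfl, rfl, rfl, rfl, rfl⟩ | ⟨rfl, rfl, rfl, rfl, rfl⟩ | ⟨rfl, rfl, rfl, rfl, rfl⟩ | ⟨rfl, rfl, rfl, rfl, rfl⟩ | ⟨rfl, rfl, rfl, rfl, rfl⟩ | ⟨rfl, rfl, rfl, rfl, rfl⟩ | ⟨rfl, rfl, rfl, rfl, rfl⟩ | ⟨rfl, rfl, rfl, rfl, rfl⟩ | ⟨rfl, rfl, rfl, rfl, rfl⟩ | ⟨rfl, rfl, rfl, rfl, rfl⟩ | ⟨rfl,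 rfl, rfl, rfl, rfl⟩) <;>
      exact ⟨⟨⟨⟨⟨hLi, rfl⟩, rfl⟩, rfl⟩, by simp⟩, by simp⟩
  · rintro ⟨⟨⟨⟨⟨-, rfl⟩, rfl⟩, rfl⟩, rfl | rfl | rfl | rfl⟩, rfl | rfl | rfl | rfl⟩ <;> simp
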